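-- pv_equiv track=rewrite | github.com/ning-cn-sy/Static-FJSP | MultiObjectiveOptimization/FJSP/Algorithm/Decode.py | get_idle_times
-- ===== SOURCE A (Python) =====
-- def get_idle_times(machine_finished_times):
--     """
--     获取机器的空闲时间段。
--
--     功能：
--     - 根据机器的已用时间片段，计算所有的空闲时间段。
--     - 假设输入的时间片段是有序的，并且表示机器的实际占用时间。
--
--     调度逻辑：
--     1. 初始化一个空列表 `idle_times`，用于存储空闲时间段。
--     2. 遍历机器的使用时间片段：
--         - 如果当前时间片段的开始时间大于前一个时间片段的结束时间，说明有空闲时间段。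
--         - 将空闲时间段 (prev_end, start) 添加到列表中。
--     3. 返回计算得到的空闲时间段列表。
--
--     Args:
--         machine_finished_times (list of tuple): 已用时间段列表，每个元素为 (start, end)，
--                                                 表示某段时间内机器被占用。
--                                                 假设输入的时间段是有序的。
--
--     Returns:
--         list of tuple: 空闲时间段列表，每个元素为 (start, end)，表示机器空闲的时间段。
--     """
--     # 初始化空闲时间段列表
--     idle_times = []
--
--     # 假设机器从时间 0 开始，记录上一个任务的结束时间
--     prev_end = 0
--
--     # 遍历已用时间段
--     for start, end in machine_finished_times:
--         # 🎈 如果当前任务的开始时间大于上一个任务的结束时间，说明有空闲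
--         if start > prev_end:
--             idle_times.append((prev_end, start))  # 添加空闲时间段
--         # 🎈 更新上一个任务的结束时间
--         prev_end = max(prev_end, end)
--
--     # 🎈 返回所有计算出的空闲时间段
--     return idle_times
-- ===== SOURCE B (Python) =====
-- def get_idle_times(machine_finished_times):
--     # Prefix-maximum of end times: prefix[i] = max end seen before position i (0 initially)
--     prefix = [0]
--     for _, end in machine_finished_times:
--         prefix.append(max(prefix[-1], end))
--     return [(pe, s) for (s, _), pe in zip(machine_finished_times, prefix) if s > pe]
-- ===== Notes on version B (the rewrite author's own statement) =====
-- stated objective: alternative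
-- what changed: Replaces the single running-accumulator loop with a precomputed prefix-maximum table of end times plus a second filtering comprehension pass.
import Mathlib
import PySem

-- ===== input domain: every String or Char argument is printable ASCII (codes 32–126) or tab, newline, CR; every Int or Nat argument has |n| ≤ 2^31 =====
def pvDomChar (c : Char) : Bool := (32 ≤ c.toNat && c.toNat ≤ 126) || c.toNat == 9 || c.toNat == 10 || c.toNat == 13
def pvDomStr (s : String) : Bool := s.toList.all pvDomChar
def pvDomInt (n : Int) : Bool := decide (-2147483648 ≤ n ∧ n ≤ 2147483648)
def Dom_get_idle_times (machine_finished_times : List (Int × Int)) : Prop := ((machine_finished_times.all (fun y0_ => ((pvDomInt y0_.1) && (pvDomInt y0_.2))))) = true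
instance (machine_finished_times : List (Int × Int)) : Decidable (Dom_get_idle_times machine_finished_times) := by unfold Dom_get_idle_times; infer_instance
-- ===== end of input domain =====

-- B replaces A's running-accumulator loop with a prefix-maximum table of end times
-- plus a filtering pass (alternative decomposition, same cost).
-- ===== PORT A =====
def pvIdleLoop (idle : List (Int × Int)) (prev_end : Int) : List (Int × Int) → List (Int × Int)
  | [] => idle
  | (s, e) :: rest =>
      pvIdleLoop (if s > prev_end then idle ++ [(prev_end, s)] else idle) (max prev_end e) rest

def get_idle_times (machine_finished_times : List (Int × Int)) : List (Int × Int) :=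
  pvIdleLoop [] 0 machine_finished_times

-- ===== PORT B =====
-- the loop building prefix[1:] : each step appends max(prefix[-1], end)
def pvPrefixMax (last : Int) : List (Int × Int) → List Int
  | [] => []
  | (_, e) :: rest => (max last e) :: pvPrefixMax (max last e) rest

def get_idle_times_alt (machine_finished_times : List (Int × Int)) : List (Int × Int) :=
  let pfx := 0 :: pvPrefixMax 0 machine_finished_times
  ((machine_finished_times.zip pfx).filter (fun p => p.2 < p.1.1)).map (fun p => (p.2, p.1.1))

-- ===== PRECONDITION & SPEC =====
def Spec_get_idle_times (machine_finished_times : List (Int × Int)) (out : List (Int × Int)) : Prop := out = get_idle_times_alt machine_finished_times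
instance (machine_finished_times : List (Int × Int)) (out : List (Int × Int)) : Decidable (Spec_get_idle_times machine_finished_times out) := by unfold Spec_get_idle_times; infer_instance

-- ===== CLAIM (what is proved, stated in full; the proofs are below) =====
def Claim_equal_get_idle_times : Prop := ∀ (machine_finished_times : List (Int × Int)), Dom_get_idle_times machine_finished_times → Spec_get_idle_times machine_finished_times (get_idle_times machine_finished_times)

-- ===== LEMMAS AND PROOFS =====

-- ===== VERDICT (by name: the statement is the Claim_ definition above) =====
theorem pvIdleLoop_eq (l : List (Int × Int)) : ∀ (idle : List (Int × Int)) (prev : Int),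
    pvIdleLoop idle prev l =
      idle ++ ((l.zip (prev :: pvPrefixMax prev l)).filter (fun p => p.2 < p.1.1)).map
        (fun p => (p.2, p.1.1)) := by
  induction l with
  | nil => intro idle prev; simp [pvIdleLoop, pvPrefixMax]
  | cons hd rest ih =>
      intro idle prev
      obtain ⟨s, e⟩ := hd
      simp only [pvIdleLoop, pvPrefixMax, List.zip_cons_cons, List.filter_cons]
      rw [ih]
      by_cases h : prev < s
      · simp [h, List.append_assoc]
      · simp [h]

theorem get_idle_times_spec : Claim_equal_get_idle_times := by
  intro l _
  unfold Spec_get_idle_times get_idle_times get_idle_times_alt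
  simpa using pvIdleLoop_eq l [] 0
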